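-- pv_equiv track=rewrite | github.com/kentq6/ESQL | helpers/algorithm.py | find_gv_aggregates
-- ===== SOURCE A (Python) =====
-- def find_gv_aggregates(gv: str, fVector: list):
--     """ Traverses fVector to find aggregate functions relevant to the given grouping variable """
--     aggregate_funcs = []
--     for f in fVector:
--         if f[:len(gv)] == gv:
--             aggregate_funcs.append(f)
--     if any('avg' in func for func in aggregate_funcs):
--         if not any('sum' in func for func in aggregate_funcs):
--             # Add aggregate func to track sum
--             sum_func = gv + '_sum_quant'
--             aggregate_funcs.append(sum_func)
--         if not any('count' in func for func in aggregate_funcs):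
--             # Add aggregate func to track count
--             count_func = gv + '_count_quant'
--             aggregate_funcs.append(count_func)
--     return gv, aggregate_funcs
-- ===== SOURCE B (Python) =====
-- def find_gv_aggregates(gv: str, fVector: list):
--     """Single pass: filter by prefix while computing avg/sum/count flags; then append trackers."""
--     aggregate_funcs = []
--     has_avg = has_sum = has_count = False
--     for f in fVector:
--         if f.startswith(gv):
--             aggregate_funcs.append(f)
--             has_avg = has_avg or 'avg' in f
--             has_sum = has_sum or 'sum' in f
--             has_count = has_count or 'count' in f
--     if has_avg:
--         if not has_sum:
--             aggregate_funcs.append(gv + '_sum_quant')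
--         if not has_count:
--             aggregate_funcs.append(gv + '_count_quant')
--     return gv, aggregate_funcs
-- ===== Notes on version B (the rewrite author's own statement) =====
-- stated objective: alternative
-- what changed: B makes a single pass over fVector that filters by prefix while computing the avg/sum/count substring flags, replacing A's three post-hoc any() re-scans of the filtered list (and A's re-scan that includes the freshly appended sum tracker).
import Mathlib
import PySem

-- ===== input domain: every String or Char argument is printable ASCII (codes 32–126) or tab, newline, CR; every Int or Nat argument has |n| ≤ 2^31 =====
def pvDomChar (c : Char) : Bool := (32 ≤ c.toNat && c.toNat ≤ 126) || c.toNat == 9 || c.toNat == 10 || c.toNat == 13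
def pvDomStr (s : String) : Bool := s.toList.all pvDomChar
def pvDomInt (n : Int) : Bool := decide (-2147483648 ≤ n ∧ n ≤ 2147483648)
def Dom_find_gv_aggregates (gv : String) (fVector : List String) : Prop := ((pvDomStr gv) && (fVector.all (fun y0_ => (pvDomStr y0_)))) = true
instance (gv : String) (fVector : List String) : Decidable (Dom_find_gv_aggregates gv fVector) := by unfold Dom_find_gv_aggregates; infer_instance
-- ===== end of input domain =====

-- B folds the prefix filter and the avg/sum/count substring flags into one pass over fVector,
-- replacing A's three post-hoc any() re-scans of the filtered list (objective: alternative decomposition).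

-- ===== PORT A =====
def find_gv_aggregates (gv : String) (fVector : List String) : String × List String :=
  -- aggregate_funcs = []; for f in fVector: if f[:len(gv)] == gv: aggregate_funcs.append(f)
  let aggregate_funcs : List String :=
    fVector.foldl (fun acc f =>
      if PySem.Str.slice f none (some (PySem.Str.len gv)) == gv then acc ++ [f] else acc) []
  let aggregate_funcs :=
    if aggregate_funcs.any (fun func => PySem.Str.isIn "avg" func) then
      let aggregate_funcs :=
        if !(aggregate_funcs.any (fun func => PySem.Str.isIn "sum" func)) then
          aggregate_funcs ++ [gv ++ "_sum_quant"]
        else aggregate_funcs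
      if !(aggregate_funcs.any (fun func => PySem.Str.isIn "count" func)) then
        aggregate_funcs ++ [gv ++ "_count_quant"]
      else aggregate_funcs
    else aggregate_funcs
  (gv, aggregate_funcs)

-- ===== PORT B =====
def find_gv_aggregates_alt (gv : String) (fVector : List String) : String × List String :=
  -- single pass: filter by prefix while accumulating the three flags
  let st : List String × Bool × Bool × Bool :=
    fVector.foldl (fun st f =>
      if PySem.Str.startswith f gv then
        (st.1 ++ [f],
         st.2.1 || PySem.Str.isIn "avg" f,
         st.2.2.1 || PySem.Str.isIn "sum" f,
         st.2.2.2 || PySem.Str.isIn "count" f)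
      else st) ([], false, false, false)
  let aggregate_funcs :=
    if st.2.1 then
      let aggregate_funcs :=
        if !st.2.2.1 then st.1 ++ [gv ++ "_sum_quant"] else st.1
      if !st.2.2.2 then aggregate_funcs ++ [gv ++ "_count_quant"] else aggregate_funcs
    else st.1
  (gv, aggregate_funcs)

-- ===== PRECONDITION & SPEC =====
def Spec_find_gv_aggregates (gv : String) (fVector : List String) (out : String × List String) : Prop := out = find_gv_aggregates_alt gv fVector
instance (gv : String) (fVector : List String) (out : String × List String) : Decidable (Spec_find_gv_aggregates gv fVector out) := by unfold Spec_find_gv_aggregates; infer_instance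

-- ===== CLAIM (what is proved, stated in full; the proofs are below) =====
def Claim_equal_find_gv_aggregates : Prop := ∀ (gv : String) (fVector : List String), Dom_find_gv_aggregates gv fVector → Spec_find_gv_aggregates gv fVector (find_gv_aggregates gv fVector)

-- ===== LEMMAS AND PROOFS =====

-- A's slice-prefix test is Python's startswith.
theorem slice_test_eq_startswith (gv f : String) :
    (PySem.Str.slice f none (some (PySem.Str.len gv)) == gv) = PySem.Str.startswith f gv := by
  rw [Bool.eq_iff_iff, beq_iff_eq, PySem.Str.startswith_eq, PySem.Chars.startswith_iff]
  rw [← String.toList_inj]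
  have hlen : PySem.Str.len gv = ((gv.toList.length : Nat) : Int) := by simp
  rw [hlen]
  simp only [PySem.Str.toList_slice, PySem.Chars.slice_eq_listSlice, PySem.List.slice_to_natCast]
  rw [List.prefix_iff_eq_take]
  constructor
  · intro h; exact h.symm
  · intro h; exact h.symm

-- B's fold computes the filtered list together with the three any-flags.
theorem alt_fold_spec (gv : String) (fVector : List String)
    (acc : List String) (a s c : Bool) :
    fVector.foldl (fun st f =>
      if PySem.Str.startswith f gv then
        (st.1 ++ [f],
         st.2.1 || PySem.Str.isIn "avg" f,
         st.2.2.1 || PySem.Str.isIn "sum" f,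
         st.2.2.2 || PySem.Str.isIn "count" f)
      else st) (acc, a, s, c)
    = (acc ++ fVector.filter (fun f => PySem.Str.startswith f gv),
       a || (fVector.filter (fun f => PySem.Str.startswith f gv)).any (fun func => PySem.Str.isIn "avg" func),
       s || (fVector.filter (fun f => PySem.Str.startswith f gv)).any (fun func => PySem.Str.isIn "sum" func),
       c || (fVector.filter (fun f => PySem.Str.startswith f gv)).any (fun func => PySem.Str.isIn "count" func)) := by
  induction fVector generalizing acc a s c with
  | nil => simp
  | cons f rest ih =>
    simp only [List.foldl_cons, List.filter_cons]
    cases hf : PySem.Str.startswith f gv with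
    | false => simp only [Bool.false_eq_true, if_false, ih]
    | true =>
      simp only [if_true, ih, List.any_cons, List.append_assoc, List.singleton_append,
        Bool.or_assoc]

-- a <+: b ++ c with b no longer than a forces a to start with b and continue into c.
theorem prefix_drop_of_prefix_append {α : Type} (a b c : List α)
    (h : a <+: b ++ c) (hl : b.length ≤ a.length) : a.drop b.length <+: c := by
  obtain ⟨t, ht⟩ := h
  have hb : b <+: a :=
    List.prefix_of_prefix_length_le (ht ▸ List.prefix_append b c) (List.prefix_append a t) hl
  obtain ⟨u, hu⟩ := hb
  have hdrop : a.drop b.length = u := by rw [← hu, List.drop_left]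
  rw [hdrop]
  refine ⟨t, ?_⟩
  have ht' : b ++ (u ++ t) = b ++ c := by rw [← List.append_assoc, hu, ht]
  exact List.append_cancel_left ht'

-- 'count' occurring in gv ++ '_sum_quant' must occur inside gv itself.
theorem count_in_sum_func (gv : String)
    (h : PySem.Str.isIn "count" (gv ++ "_sum_quant") = true) :
    ("count".toList : List Char) <:+: gv.toList := by
  have h' : PySem.Chars.isIn "count".toList (gv.toList ++ "_sum_quant".toList) = true := by
    have := (PySem.Str.isIn_iff_infix "count" (gv ++ "_sum_quant")).mp h
    rw [String.toList_append] at this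
    exact (PySem.Chars.isIn_iff_infix _ _).mpr this
  obtain ⟨j, hj⟩ := (PySem.Chars.exists_prefix_drop_iff_isIn _ _).mpr h'
  rw [List.drop_append] at hj
  have h5 : ("count".toList : List Char).length = 5 := by decide
  have hk : (gv.toList.drop j).length = gv.toList.length - j := by simp
  by_cases hjl : gv.toList.length ≤ j
  · -- the whole occurrence lies in "_sum_quant": impossible
    exfalso
    rw [List.drop_eq_nil_of_le hjl, List.nil_append] at hj
    have : ("count".toList : List Char) <:+: "_sum_quant".toList :=
      hj.isInfix.trans (List.drop_suffix _ _).isInfix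
    exact (by decide : ¬ (("count".toList : List Char) <:+: "_sum_quant".toList)) this
  · have hjl' : j < gv.toList.length := by omega
    have hzero : j - gv.toList.length = 0 := by omega
    rw [hzero, List.drop_zero] at hj
    by_cases hbig : 5 ≤ gv.toList.length - j
    · -- occurrence fits inside gv
      have hc : ("count".toList : List Char) <+: gv.toList.drop j :=
        List.prefix_of_prefix_length_le hj (List.prefix_append _ _) (by rw [hk, h5]; omega)
      exact hc.isInfix.trans (List.drop_suffix _ _).isInfix
    · exfalso
      have hsplit := prefix_drop_of_prefix_append _ _ _ hj (by rw [hk, h5]; omega)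
      rw [hk] at hsplit
      have hforall : ∀ k, 1 ≤ k → k < 5 →
          ¬ (("count".toList : List Char).drop k <+: "_sum_quant".toList) := by decide
      exact hforall (gv.toList.length - j) (by omega) (by omega) hsplit

theorem find_gv_aggregates_spec : Claim_equal_find_gv_aggregates := by
  intro gv fVector _
  unfold Spec_find_gv_aggregates find_gv_aggregates find_gv_aggregates_alt
  simp only [slice_test_eq_startswith, alt_fold_spec, PySem.List.foldl_append_if_eq_filter,
    List.nil_append, Bool.false_or]
  by_cases havg :
      (fVector.filter (fun f => PySem.Str.startswith f gv)).any
        (fun func => PySem.Str.isIn "avg" func) = true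
  · simp only [havg, if_true]
    by_cases hsum :
        (fVector.filter (fun f => PySem.Str.startswith f gv)).any
          (fun func => PySem.Str.isIn "sum" func) = true
    · simp only [hsum, Bool.not_true, Bool.false_eq_true, if_false]
    · rw [Bool.not_eq_true] at hsum
      have key : ((fVector.filter (fun f => PySem.Str.startswith f gv)) ++ [gv ++ "_sum_quant"]).any
            (fun func => PySem.Str.isIn "count" func)
          = (fVector.filter (fun f => PySem.Str.startswith f gv)).any
            (fun func => PySem.Str.isIn "count" func) := by
        rw [List.any_append]
        simp only [List.any_cons, List.any_nil, Bool.or_false]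
        cases hc : PySem.Str.isIn "count" (gv ++ "_sum_quant")
        · rw [Bool.or_false]
        · obtain ⟨e, heL, _⟩ := List.any_eq_true.mp havg
          have hpre : gv.toList <+: e.toList := by
            have hsw := (List.mem_filter.mp heL).2
            rw [PySem.Str.startswith_eq] at hsw
            exact (PySem.Chars.startswith_iff _ _).mp hsw
          have hcnt : ("count".toList : List Char) <:+: e.toList :=
            (count_in_sum_func gv hc).trans hpre.isInfix
          have hany : (fVector.filter (fun f => PySem.Str.startswith f gv)).any
              (fun func => PySem.Str.isIn "count" func) = true :=
            List.any_eq_true.mpr ⟨e, heL, (PySem.Str.isIn_iff_infix _ _).mpr hcnt⟩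
          rw [Bool.or_true, hany]
      simp only [hsum, Bool.not_false, if_true, key]
  · rw [Bool.not_eq_true] at havg
    simp only [havg, Bool.false_eq_true, if_false]
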